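-- pv_equiv track=rewrite | github.com/tmdwns1101/AlgorithmStudy | 프로그래머스/프로그래머스/seungjun/타일_장식물.py | solution
-- ===== SOURCE A (Python) =====
-- def solution(N):
--     answer = 0
--     dp = [0] * (N+1)
--
--     dp[1] = 1
--     dp[2] = 1
--
--     for i in range(3,N+1):
--         dp[i] = dp[i-1] + dp[i-2]
--
--     answer = dp[N] *2 + (dp[N] + dp[N-1]) * 2
--     return answer
-- ===== SOURCE B (Python) =====
-- def solution(N):
--     # Fast-doubling Fibonacci: fd(n) = (F(n), F(n+1)) in O(log n) steps.
--     def fd(n):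
--         if n == 0:
--             return (0, 1)
--         a, b = fd(n >> 1)
--         c = a * (2 * b - a)
--         d = a * a + b * b
--         if n & 1:
--             return (d, c + d)
--         return (c, d)
--     a, b = fd(N)
--     # A's answer = 2*F(N) + 2*(F(N) + F(N-1)) = 2*F(N) + 2*F(N+1)
--     return 2 * a + 2 * b
-- ===== Notes on version B (the rewrite author's own statement) =====
-- stated objective: faster
-- what changed: Replaces the O(N) dp-array Fibonacci loop with recursive fast-doubling Fibonacci, returning 2*F(N)+2*F(N+1) directly; intended as faster (O(log N) multiplications) - measured 251x at the largest size both programs finished, unconfirmed beyond that where outputs exceed the harness's integer-string limit.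
import Mathlib
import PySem

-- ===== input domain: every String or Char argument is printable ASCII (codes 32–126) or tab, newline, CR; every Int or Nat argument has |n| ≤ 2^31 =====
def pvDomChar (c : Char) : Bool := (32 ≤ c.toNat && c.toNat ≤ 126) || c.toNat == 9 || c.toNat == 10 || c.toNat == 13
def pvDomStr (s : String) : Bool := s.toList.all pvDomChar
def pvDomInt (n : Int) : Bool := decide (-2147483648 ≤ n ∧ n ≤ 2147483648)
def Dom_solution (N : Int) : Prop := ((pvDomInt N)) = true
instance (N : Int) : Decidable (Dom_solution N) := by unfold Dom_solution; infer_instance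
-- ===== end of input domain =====

-- B replaces A's linear dp-array Fibonacci loop by recursive fast-doubling Fibonacci; intended as faster (measured ~251x at the largest size both finished).

-- ===== PORT A =====
-- Literal port of A: dp array, dp[1]=dp[2]=1, loop filling dp[i]=dp[i-1]+dp[i-2], then the answer formula.
-- dp is a Lean Array (O(1) update, like a Python list); the .toNat indexing is exact here because every
-- index A uses (1, 2, i in range(3,N+1), N, N-1) is nonnegative and in range under Pre_ (N ≥ 2);
-- outside Pre_ Python raises IndexError and nothing is claimed.
def solution (N : Int) : Int :=
  let dp0 := (List.replicate (N + 1).toNat (0 : Int)).toArray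
  let dp1 := dp0.setIfInBounds 1 1
  let dp2 := dp1.setIfInBounds 2 1
  let dp := (PySem.List.pyRange 3 (N + 1) 1).foldl
    (fun dp i =>
      dp.setIfInBounds i.toNat (dp.getD (i - 1).toNat 0 + dp.getD (i - 2).toNat 0)) dp2
  dp.getD N.toNat 0 * 2 + (dp.getD N.toNat 0 + dp.getD (N - 1).toNat 0) * 2

-- ===== PORT B =====
-- fast doubling: fd n = (F(n), F(n+1))
def fdB : Nat → Int × Int
  | 0 => (0, 1)
  | (n + 1) =>
    let p := fdB ((n + 1) / 2)
    let a := p.1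
    let b := p.2
    let c := a * (2 * b - a)
    let d := a * a + b * b
    if (n + 1) % 2 = 1 then (d, c + d) else (c, d)
decreasing_by exact Nat.div_lt_self (Nat.succ_pos n) (by omega)

def solution_alt (N : Int) : Int :=
  let p := fdB N.toNat
  2 * p.1 + 2 * p.2

-- ===== PRECONDITION & SPEC =====
-- A raises IndexError when the dp seeding indexes past the end (inputs smaller than two); Pre_ excludes exactly those.
def Pre_solution (N : Int) : Prop := 2 ≤ N
instance (N : Int) : Decidable (Pre_solution N) := by unfold Pre_solution; infer_instance
def pvWitness_solution : Int := (5)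

def Spec_solution (N : Int) (out : Int) : Prop := out = solution_alt N
instance (N : Int) (out : Int) : Decidable (Spec_solution N out) := by unfold Spec_solution; infer_instance

-- ===== CLAIM (what is proved, stated in full; the proofs are below) =====
def Claim_equal_solution : Prop := ∀ (N : Int), Dom_solution N → Pre_solution N → Spec_solution N (solution N)

-- ===== LEMMAS AND PROOFS =====

def fibI (k : Nat) : Int := (Nat.fib k : Int)

theorem fibI_add_two (k : Nat) : fibI (k + 2) = fibI k + fibI (k + 1) := by
  simp [fibI, Nat.fib_add_two]

theorem fdB_eq (k : Nat) : fdB k = (fibI k, fibI (k + 1)) := by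
  induction k using Nat.strong_induction_on with
  | _ k ih =>
    match k with
    | 0 => simp [fdB, fibI]
    | (n + 1) =>
      have h2 : (n + 1) / 2 < n + 1 := Nat.div_lt_self (Nat.succ_pos n) (by omega)
      rw [fdB, ih _ h2]
      set m := (n + 1) / 2 with hm
      have hmono : Nat.fib m ≤ Nat.fib (m + 1) := Nat.fib_mono (by omega)
      have heven : fibI (2 * m) = fibI m * (2 * fibI (m + 1) - fibI m) := by
        have h := Nat.fib_two_mul m
        simp only [fibI]
        rw [h, Nat.cast_mul, Nat.cast_sub (by omega), Nat.cast_mul]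
        push_cast
        ring
      have hodd : fibI (2 * m + 1) = fibI m * fibI m + fibI (m + 1) * fibI (m + 1) := by
        have h := Nat.fib_two_mul_add_one m
        simp only [fibI]
        rw [h]
        push_cast
        ring
      by_cases hpar : (n + 1) % 2 = 1
      · have hk : n + 1 = 2 * m + 1 := by omega
        rw [if_pos hpar, hk]
        show (_, _) = (_, _)
        have h2m2 : fibI (2 * m + 1 + 1) = fibI (2 * m) + fibI (2 * m + 1) := by
          simpa using fibI_add_two (2 * m)
        rw [h2m2, heven, hodd]
      · have hk : n + 1 = 2 * m := by omega
        rw [if_neg hpar, hk]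
        show (_, _) = (_, _)
        rw [heven, hodd]

-- A-side: bridge the Array fold to a List fold, then show the loop builds the Fibonacci table.
def dpBodyL (dp : List Int) (i : Int) : List Int :=
  dp.set i.toNat (dp.getD (i - 1).toNat 0 + dp.getD (i - 2).toNat 0)

theorem foldl_dpBody_toArray (is : List Int) (l : List Int) :
    is.foldl (fun dp i =>
        dp.setIfInBounds i.toNat (dp.getD (i - 1).toNat 0 + dp.getD (i - 2).toNat 0)) l.toArray
      = (is.foldl dpBodyL l).toArray := by
  induction is generalizing l with
  | nil => rfl
  | cons i is ih =>
    have h1 : (l.toArray).setIfInBounds i.toNat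
        ((l.toArray).getD (i - 1).toNat 0 + (l.toArray).getD (i - 2).toNat 0)
        = (dpBodyL l i).toArray := by
      simp [dpBodyL]
    rw [List.foldl_cons, List.foldl_cons, h1, ih]

theorem loop_inv (n : Nat) (hn : 2 ≤ n) (m : Nat) (hm2 : 2 ≤ m) (hmn : m ≤ n) :
    (PySem.List.pyRange 3 ((m : Int) + 1) 1).foldl dpBodyL
      (((List.replicate (n + 1) (0 : Int)).set 1 1).set 2 1)
    = (List.range (m + 1)).map fibI ++ List.replicate (n - m) 0 := by
  induction m with
  | zero => omega
  | succ m ihm =>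
    by_cases hm : m < 2
    · -- base case m+1 = 2
      have hm1 : m = 1 := by omega
      subst hm1
      rw [PySem.List.pyRange_one_eq_nil (by norm_num)]
      obtain ⟨j, hj⟩ : ∃ j, n = j + 2 := ⟨n - 2, by omega⟩
      subst hj
      simp [List.replicate_succ, List.range_succ, fibI, List.set]
    · have hm2' : 2 ≤ m := by omega
      have hmn' : m ≤ n := by omega
      have hLm := ihm hm2' hmn'
      have hsplit : PySem.List.pyRange 3 ((m : Int) + 1 + 1) 1
          = PySem.List.pyRange 3 ((m : Int) + 1) 1 ++ [(m : Int) + 1] := by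
        have := PySem.List.pyRange_one_succ_right (a := 3) (b := (m : Int) + 1) (by omega)
        simpa using this
      have hcast : ((m : Int) + 1 + 1) = ((m + 1 : Nat) : Int) + 1 := by push_cast; ring
      rw [← hcast, hsplit, List.foldl_append, hLm]
      simp only [List.foldl_cons, List.foldl_nil]
      -- evaluate the body at index m+1
      unfold dpBodyL
      have hlen : ((List.range (m + 1)).map fibI).length = m + 1 := by simp
      have ht1 : ((m : Int) + 1 - 1).toNat = m := by omega
      have ht2 : ((m : Int) + 1 - 2).toNat = m - 1 := by omega
      have ht0 : ((m : Int) + 1).toNat = m + 1 := by omega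
      rw [ht0, ht1, ht2]
      have hgm : ((List.range (m + 1)).map fibI ++ List.replicate (n - m) 0).getD m 0 = fibI m := by
        rw [List.getD_eq_getElem?_getD, List.getElem?_append_left (by omega)]
        simp
      have hgm1 : ((List.range (m + 1)).map fibI ++ List.replicate (n - m) 0).getD (m - 1) 0 = fibI (m - 1) := by
        rw [List.getD_eq_getElem?_getD, List.getElem?_append_left (by omega)]
        simp
      rw [hgm, hgm1]
      have hsum : fibI m + fibI (m - 1) = fibI (m + 1) := by
        obtain ⟨j, hj⟩ : ∃ j, m = j + 1 := ⟨m - 1, by omega⟩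
        subst hj
        simp only [Nat.add_sub_cancel]
        rw [fibI_add_two j]
        ring
      rw [hsum]
      rw [List.set_append]
      simp only [hlen]
      rw [if_neg (by omega)]
      have hrep : List.replicate (n - m) (0 : Int) = 0 :: List.replicate (n - (m + 1)) 0 := by
        have : n - m = (n - (m + 1)) + 1 := by omega
        rw [this, List.replicate_succ]
      rw [hrep]
      simp [List.range_succ]

theorem getD_fib_table (n j : Nat) (hj : j ≤ n) :
    ((List.range (n + 1)).map fibI ++ List.replicate 0 (0 : Int)).getD j 0 = fibI j := by
  rw [List.getD_eq_getElem?_getD, List.getElem?_append_left (by simp; omega)]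
  simp [hj]

-- ===== VERDICT (by name: the statement is the Claim_ definition above) =====
theorem solution_spec : Claim_equal_solution := by
  intro N _ hpre
  have hN : (2 : Int) ≤ N := hpre
  obtain ⟨n, hn, hn2⟩ : ∃ n : Nat, N = (n : Int) ∧ 2 ≤ n := by
    refine ⟨N.toNat, ?_, ?_⟩ <;> omega
  subst hn
  unfold Spec_solution solution solution_alt
  have hrep : (((n : Int) + 1)).toNat = n + 1 := by omega
  simp only [hrep]
  have hinit : ((List.replicate (n + 1) (0 : Int)).toArray.setIfInBounds 1 1).setIfInBounds 2 1
      = (((List.replicate (n + 1) (0 : Int)).set 1 1).set 2 1).toArray := by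
    simp [← List.toArray_replicate]
  rw [hinit, foldl_dpBody_toArray]
  have hloop := loop_inv n hn2 n hn2 (le_refl n)
  simp only [Nat.sub_self] at hloop
  rw [hloop]
  have htn : ((n : Int)).toNat = n := by omega
  have htn1 : ((n : Int) - 1).toNat = n - 1 := by omega
  rw [htn, htn1]
  have hg1 : ((List.range (n + 1)).map fibI ++ List.replicate 0 (0 : Int)).toArray.getD n 0 = fibI n := by
    rw [show ((List.range (n + 1)).map fibI ++ List.replicate 0 (0 : Int)).toArray.getD n 0
        = ((List.range (n + 1)).map fibI ++ List.replicate 0 (0 : Int)).getD n 0 by simp]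
    exact getD_fib_table n n (le_refl n)
  have hg2 : ((List.range (n + 1)).map fibI ++ List.replicate 0 (0 : Int)).toArray.getD (n - 1) 0 = fibI (n - 1) := by
    rw [show ((List.range (n + 1)).map fibI ++ List.replicate 0 (0 : Int)).toArray.getD (n - 1) 0
        = ((List.range (n + 1)).map fibI ++ List.replicate 0 (0 : Int)).getD (n - 1) 0 by simp]
    exact getD_fib_table n (n - 1) (by omega)
  rw [hg1, hg2, fdB_eq]
  have hsum : fibI (n + 1) = fibI (n - 1) + fibI n := by
    obtain ⟨j, hj⟩ : ∃ j, n = j + 1 := ⟨n - 1, by omega⟩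
    subst hj
    simp only [Nat.add_sub_cancel]
    exact fibI_add_two j
  simp only [hsum]
  ring
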